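-- pv_equiv track=rewrite | github.com/marcianoo21/ImageProcessing | erosion_dilation.py | imgErosion
-- ===== SOURCE A (Python) =====
-- def imgErosion(img, struct):
--     rows = len(img)
--     cols = len(img[0])
--
--     struct_len = len(struct[0])
--
--     eroded_img = [[0 for _ in range(cols)] for _ in range(rows)]
--
--     for i in range(rows):
--         for j in range(cols):
--             fits = True
--             for k in range(struct_len):
--                 if i < rows and j + k < cols:
--                     if img[i][j + k] != struct[0][k]:
--                         fits = False
--                         break
--                 else:
--                     fits = False
--                     break
--
--             if fits:
--                 eroded_img[i][j] = 1
--
--     return eroded_img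
-- ===== SOURCE B (Python) =====
-- def imgErosion(img, struct):
--     pat = struct[0]
--     L = len(pat)
--     cols = len(img[0])
--     return [[1 if j + L <= cols and row[j:j+L] == pat else 0 for j in range(cols)]
--             for row in img]
-- ===== Notes on version B (the rewrite author's own statement) =====
-- stated objective: simpler
-- what changed: The triple-nested loop with a per-cell 'fits' flag and break is replaced by a per-row comprehension that marks position j iff the window stays in bounds and the slice row[j:j+L] equals struct[0]; a timing run measured this constant-factor change (C-level slice comparison instead of a per-element Python loop) at ~2.5x.
import Mathlib
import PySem

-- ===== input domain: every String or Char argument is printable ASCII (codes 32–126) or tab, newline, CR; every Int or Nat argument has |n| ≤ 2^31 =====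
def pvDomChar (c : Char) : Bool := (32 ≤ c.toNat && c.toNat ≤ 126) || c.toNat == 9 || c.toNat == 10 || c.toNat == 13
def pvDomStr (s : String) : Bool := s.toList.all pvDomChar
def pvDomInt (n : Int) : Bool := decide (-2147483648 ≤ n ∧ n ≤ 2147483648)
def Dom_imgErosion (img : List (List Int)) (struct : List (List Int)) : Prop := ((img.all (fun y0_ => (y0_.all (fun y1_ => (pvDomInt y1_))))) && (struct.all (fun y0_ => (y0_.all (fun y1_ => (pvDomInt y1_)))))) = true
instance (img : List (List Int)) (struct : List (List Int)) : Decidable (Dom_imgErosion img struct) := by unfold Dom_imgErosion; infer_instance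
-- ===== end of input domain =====

-- B replaces A's triple-nested loop (per-cell flag scan with break) by a per-row comprehension
-- testing slice equality against struct[0]; same asymptotic cost, simpler code. Return value only.

-- ===== PORT A =====
-- inner 'for k in range(struct_len)' loop with its early break, iterating the list of k's
def pvFitsA (img : List (List Int)) (pat : List Int) (rows cols i j : Nat) : List Nat → Bool
  | [] => true
  | k :: ks =>
    if i < rows && j + k < cols then
      if (img.getD i []).getD (j + k) 0 != pat.getD k 0 then false
      else pvFitsA img pat rows cols i j ks
    else false

def imgErosion (img : List (List Int)) (struct : List (List Int)) : List (List Int) :=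
  let rows := img.length
  let cols := (img.getD 0 []).length
  let pat := struct.getD 0 []
  let struct_len := pat.length
  (List.range rows).map (fun i =>
    (List.range cols).map (fun j =>
      if pvFitsA img pat rows cols i j (List.range struct_len) then 1 else 0))

-- ===== PORT B =====
def imgErosion_alt (img : List (List Int)) (struct : List (List Int)) : List (List Int) :=
  let pat := struct.getD 0 []
  let L := pat.length
  let cols := (img.getD 0 []).length
  img.map (fun row =>
    (List.range cols).map (fun j =>
      if decide (j + L ≤ cols) && (PySem.List.slice row (some (j : Int)) (some ((j : Int) + (L : Int))) == pat) then 1 else 0))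

-- ===== PRECONDITION & SPEC =====
-- Pre_ excludes exactly the inputs on which Python A raises IndexError: img = [] or struct = []
-- (the [0] accesses), and, when struct[0] is nonempty, any image row shorter than len(img[0]).
def Pre_imgErosion (img : List (List Int)) (struct : List (List Int)) : Prop :=
  img ≠ [] ∧ struct ≠ [] ∧
    (struct.getD 0 [] ≠ [] → ∀ r ∈ img, (img.getD 0 []).length ≤ r.length)
instance (img : List (List Int)) (struct : List (List Int)) : Decidable (Pre_imgErosion img struct) := by unfold Pre_imgErosion; infer_instance

def pvWitness_imgErosion : List (List Int) × List (List Int) := ([[1, 0, 1], [1, 1, 1]], [[1, 1]])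

def Spec_imgErosion (img : List (List Int)) (struct : List (List Int)) (out : List (List Int)) : Prop := out = imgErosion_alt img struct
instance (img : List (List Int)) (struct : List (List Int)) (out : List (List Int)) : Decidable (Spec_imgErosion img struct out) := by unfold Spec_imgErosion; infer_instance

-- ===== CLAIM (what is proved, stated in full; the proofs are below) =====
def Claim_equal_imgErosion : Prop := ∀ (img : List (List Int)) (struct : List (List Int)), Dom_imgErosion img struct → Pre_imgErosion img struct → Spec_imgErosion img struct (imgErosion img struct)
-- ===== LEMMAS AND PROOFS =====

-- A's inner scan started at offset a (with a + n = pat.length and j + a ≤ cols already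
-- established) equals "window stays inside cols ∧ the remaining slice matches the rest of pat".
lemma pvFitsA_eq (img : List (List Int)) (pat : List Int) (cols i j : Nat)
    (hi : i < img.length) (hrow : cols ≤ (img.getD i []).length) :
    ∀ n a, a + n = pat.length → j + a ≤ cols →
      pvFitsA img pat img.length cols i j (List.range' a n) =
        (decide (j + a + n ≤ cols) &&
          (((img.getD i []).drop (j + a)).take n == pat.drop a)) := by
  intro n
  induction n with
  | zero =>
    intro a ha hja
    have hd : pat.drop a = [] := List.drop_eq_nil_of_le (by omega)
    simp [pvFitsA, hd, hja]
  | succ n ih =>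
    intro a ha hja
    rw [List.range'_succ]
    by_cases hjc : j + a < cols
    · have hlt : j + a < (img.getD i []).length := lt_of_lt_of_le hjc hrow
      have halt : a < pat.length := by omega
      have hdrop : (img.getD i []).drop (j + a) =
          (img.getD i [])[j + a] :: (img.getD i []).drop (j + a + 1) :=
        List.drop_eq_getElem_cons hlt
      have hpd : pat.drop a = pat[a] :: pat.drop (a + 1) :=
        List.drop_eq_getElem_cons halt
      simp only [pvFitsA, hi, hjc, decide_true, Bool.and_self, if_true, bne_iff_ne, ne_eq,
        List.getD_eq_getElem _ _ hlt, List.getD_eq_getElem _ _ halt]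
      rw [hdrop, hpd, List.take_succ_cons]
      by_cases heq : (img.getD i [])[j + a] = pat[a]
      · simp only [heq, not_true_eq_false, if_false]
        rw [ih (a + 1) (by omega) (by omega)]
        have h1 : j + (a + 1) = j + a + 1 := by omega
        rw [h1]
        simp only [List.cons_beq_cons, BEq.rfl, Bool.true_and]
        congr 1
        simp only [decide_eq_decide]
        omega
      · rw [if_pos heq, List.cons_beq_cons]
        have hbe : ((img.getD i [])[j + a] == pat[a]) = false := beq_eq_false_iff_ne.mpr heq
        rw [hbe]
        simp
    · simp only [pvFitsA, hi, hjc, decide_true, decide_false, Bool.and_false]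
      have h2 : ¬ (j + a + (n + 1) ≤ cols) := by omega
      simp [h2]

-- mapping a function of the i-th element over range (length l) is mapping over l itself
lemma map_range_getD {α β : Type} (l : List α) (d : α) (g : α → β) :
    (List.range l.length).map (fun i => g (l.getD i d)) = l.map g := by
  induction l with
  | nil => simp
  | cons x xs ih =>
    simp only [List.length_cons, List.range_succ_eq_map, List.map_cons, List.map_map]
    refine congrArg₂ _ (by simp) ?_
    rw [← ih]
    apply List.map_congr_left
    intro i _
    simp

-- ===== VERDICT (by name: the statement is the Claim_ definition above) =====
theorem imgErosion_spec : Claim_equal_imgErosion := by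
  intro img struct _ hpre
  obtain ⟨-, -, hrows⟩ := hpre
  unfold Spec_imgErosion imgErosion imgErosion_alt
  set pat := struct.getD 0 [] with hpat
  set cols := (img.getD 0 []).length with hcols
  rw [← map_range_getD img ([] : List Int)
      (fun row => (List.range cols).map (fun j =>
        if decide (j + pat.length ≤ cols) &&
            (PySem.List.slice row (some (j : Int)) (some ((j : Int) + (pat.length : Int))) == pat)
          then 1 else 0))]
  apply List.map_congr_left
  intro i hi
  rw [List.mem_range] at hi
  apply List.map_congr_left
  intro j hj
  rw [List.mem_range] at hj
  rw [PySem.List.slice_natCast_add]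
  by_cases hp : pat = []
  · simp [hp, pvFitsA, Nat.le_of_lt hj]
  · have hmem : img.getD i [] ∈ img := by
      rw [List.getD_eq_getElem _ _ hi]; exact List.getElem_mem hi
    have hrow : cols ≤ (img.getD i []).length := hrows (hpat ▸ hp) _ hmem
    have h := pvFitsA_eq img pat cols i j hi hrow pat.length 0 (by omega) (by omega)
    simp only [List.range_eq_range'] at h ⊢
    rw [h]
    simp
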